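-- pv_equiv track=rewrite | github.com/Safaet-Rabbi/Python | Codeforce/1335C.py | max_team_size
-- ===== SOURCE A (Python) =====
-- from collections import Counter
--
-- def max_team_size(t, test_cases):
--     results = []
--     for case in test_cases:
--         n, a = case
--
--         skill_count = Counter(a)
--
--         distinct_count = len(skill_count)
--
--         max_frequency = max(skill_count.values())
--
--         max_size = min(distinct_count, max_frequency)
--
--         if distinct_count == max_frequency:
--             results.append(max_size - 1)
--         else:
--             results.append(max_size)
--
--     return results
-- ===== SOURCE B (Python) =====
-- def max_team_size(t, test_cases):
--     results = []
--     for n, a in test_cases: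
--         s = sorted(a)
--         prev = None
--         run = 0
--         best = 0
--         distinct = 0
--         for x in s:
--             if prev is None or x != prev:
--                 distinct += 1
--                 run = 1
--             else:
--                 run += 1
--             if run > best:
--                 best = run
--             prev = x
--         max_size = min(distinct, best)
--         results.append(max_size - 1 if distinct == best else max_size)
--     return results
-- ===== Notes on version B (the rewrite author's own statement) =====
-- stated objective: alternative
-- what changed: Replaces the Counter hash map and the max() over its values by sorting each skill list once and scanning it with a single run-length loop that yields both the distinct-value count and the maximum frequency.
-- outside the precondition, e.g. on max_team_size(1, [(0, [])]): A raises ValueError, B returns [-1]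
import Mathlib
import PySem

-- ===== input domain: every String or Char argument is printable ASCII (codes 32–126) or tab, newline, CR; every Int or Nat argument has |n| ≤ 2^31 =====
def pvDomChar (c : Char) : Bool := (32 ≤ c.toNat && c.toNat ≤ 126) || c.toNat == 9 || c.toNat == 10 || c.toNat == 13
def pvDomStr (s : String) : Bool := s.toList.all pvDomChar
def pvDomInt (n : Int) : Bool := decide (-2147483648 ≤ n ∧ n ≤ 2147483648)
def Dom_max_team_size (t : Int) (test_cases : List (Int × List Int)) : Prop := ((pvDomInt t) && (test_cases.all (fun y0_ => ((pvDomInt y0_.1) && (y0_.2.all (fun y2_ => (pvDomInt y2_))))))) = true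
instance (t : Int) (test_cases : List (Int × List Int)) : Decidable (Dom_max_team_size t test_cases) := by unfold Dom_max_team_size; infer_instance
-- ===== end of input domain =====

-- B replaces the Counter dict + max(values) by sorting each skill list and one run-length
-- scan computing both the distinct count and the maximum frequency (alternative decomposition).

-- ===== PORT A =====
-- one test case of A: Counter, len(counter), max(counter.values()); max() on an empty
-- Counter raises ValueError in Python (max? = none), excluded by Pre_ below.
def pvCaseA (a : List Int) : Int :=
  let skill_count := PySem.Dict.counter a
  let distinct_count : Int := skill_count.size
  let max_frequency : Int := (PySem.List.max? skill_count.values (fun v => v)).getD 0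
  let max_size := min distinct_count max_frequency
  if distinct_count = max_frequency then max_size - 1 else max_size

def max_team_size (t : Int) (test_cases : List (Int × List Int)) : List Int :=
  test_cases.foldl (fun results case => results ++ [pvCaseA case.2]) []

-- ===== PORT B =====
-- loop body of B's run-length scan; state = (prev, run, best, distinct)
def pvStep (st : Option Int × Int × Int × Int) (x : Int) : Option Int × Int × Int × Int :=
  let rd : Int × Int :=
    match st.1 with
    | none => (1, st.2.2.2 + 1)
    | some p => if x ≠ p then (1, st.2.2.2 + 1) else (st.2.1 + 1, st.2.2.2)
  (some x, rd.1, if rd.1 > st.2.2.1 then rd.1 else st.2.2.1, rd.2)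

def pvCaseB (a : List Int) : Int :=
  let s := PySem.List.sorted a (fun x => x) false
  let st := s.foldl pvStep (none, 0, 0, 0)
  let max_size := min st.2.2.2 st.2.2.1
  if st.2.2.2 = st.2.2.1 then max_size - 1 else max_size

def max_team_size_alt (t : Int) (test_cases : List (Int × List Int)) : List Int :=
  test_cases.foldl (fun results case => results ++ [pvCaseB case.2]) []

-- ===== PRECONDITION & SPEC =====
-- Pre_ excludes test cases with an empty skill list, on which Python A raises
-- ValueError from max() over an empty Counter.
def Pre_max_team_size (t : Int) (test_cases : List (Int × List Int)) : Prop :=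
  ∀ c ∈ test_cases, c.2 ≠ []
instance (t : Int) (test_cases : List (Int × List Int)) : Decidable (Pre_max_team_size t test_cases) := by unfold Pre_max_team_size; infer_instance

def pvWitness_max_team_size : Int × (List (Int × List Int)) := (2, [(3, [1, 1, 2]), (4, [5, 5, 5, 5])])

def Spec_max_team_size (t : Int) (test_cases : List (Int × List Int)) (out : List Int) : Prop := out = max_team_size_alt t test_cases
instance (t : Int) (test_cases : List (Int × List Int)) (out : List Int) : Decidable (Spec_max_team_size t test_cases out) := by unfold Spec_max_team_size; infer_instance

-- ===== CLAIM (what is proved, stated in full; the proofs are below) =====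
def Claim_equal_max_team_size : Prop := ∀ (t : Int) (test_cases : List (Int × List Int)), Dom_max_team_size t test_cases → Pre_max_team_size t test_cases → Spec_max_team_size t test_cases (max_team_size t test_cases)

-- ===== LEMMAS AND PROOFS =====

-- one step of the scan, the three branches
theorem pv_step_none (x r b d : Int) : pvStep (none, r, b, d) x = (some x, 1, max b 1, d + 1) := by
  simp [pvStep, Prod.ext_iff]; omega

theorem pv_step_same (x r b d : Int) : pvStep (some x, r, b, d) x = (some x, r + 1, max b (r + 1), d) := by
  simp [pvStep, Prod.ext_iff]; omega

theorem pv_step_ne (x q r b d : Int) (h : x ≠ q) : pvStep (some q, r, b, d) x = (some x, 1, max b 1, d + 1) := by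
  simp [pvStep, Prod.ext_iff, h]; omega

-- scanning a run of copies of v with prev = v: run increases, best takes the max
theorem pv_scan_replicate (m : Nat) (v r b d : Int) (hrb : r ≤ b) :
    (List.replicate m v).foldl pvStep (some v, r, b, d) = (some v, r + m, max b (r + m), d) := by
  induction m generalizing r b with
  | zero => simp [max_eq_left hrb]
  | succ k ih =>
    rw [List.replicate_succ, List.foldl_cons, pv_step_same,
      ih (r + 1) (max b (r + 1)) (le_max_right _ _)]
    simp only [Prod.mk.injEq, true_and, and_true]
    constructor <;> (push_cast; omega)

-- starting best/distinct offset out of a scan (same prev and run)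
theorem pv_scan_offset (s : List Int) (p : Option Int) (r b d : Int) (hb : 0 ≤ b) (hr : 0 ≤ r) :
    s.foldl pvStep (p, r, b, d) =
      ((s.foldl pvStep (p, r, 0, 0)).1, (s.foldl pvStep (p, r, 0, 0)).2.1,
        max b (s.foldl pvStep (p, r, 0, 0)).2.2.1, d + (s.foldl pvStep (p, r, 0, 0)).2.2.2) := by
  induction s generalizing p r b d with
  | nil => simp [max_eq_left hb]
  | cons x t ih =>
    simp only [List.foldl_cons]
    -- run' and the distinct increment depend only on p and r
    obtain ⟨r', δ, hr', hL, hF⟩ :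
        ∃ r' δ, 1 ≤ r' ∧
          pvStep (p, r, b, d) x = (some x, r', max b r', d + δ) ∧
          pvStep (p, r, 0, 0) x = (some x, r', max 0 r', 0 + δ) := by
      cases p with
      | none => exact ⟨1, 1, le_refl _, pv_step_none x r b d, pv_step_none x r 0 0⟩
      | some q =>
        by_cases hxq : x = q
        · subst hxq
          exact ⟨r + 1, 0, by omega, by rw [pv_step_same]; simp,
            by rw [pv_step_same]; simp⟩
        · exact ⟨1, 1, le_refl _, pv_step_ne x q r b d hxq, pv_step_ne x q r 0 0 hxq⟩
    rw [hL, hF]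
    rw [ih (some x) r' (max b r') (d + δ) (le_trans hb (le_max_left _ _)) (by omega),
        ih (some x) r' (max 0 r') (0 + δ) (by omega) (by omega)]
    simp only [Prod.mk.injEq, true_and]
    constructor <;> omega

-- a fresh value before the head of the list behaves like no previous value
theorem pv_scan_restart (s : List Int) (p r : Int) (hs : s ≠ []) (hne : s.head hs ≠ p) :
    s.foldl pvStep (some p, r, 0, 0) = s.foldl pvStep (none, 0, 0, 0) := by
  cases s with
  | nil => exact absurd rfl hs
  | cons x t =>
    simp only [List.head_cons] at hne
    simp only [List.foldl_cons]
    rw [pv_step_ne x p r 0 0 hne, pv_step_none]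

-- the value of the leading run does not reappear after dropWhile on a sorted list
theorem pv_not_mem_dropWhile (v : Int) (t : List Int) (hvt : ∀ y ∈ t, v ≤ y)
    (htp : t.Pairwise (· ≤ ·)) : v ∉ t.dropWhile (fun y => y == v) := by
  induction t with
  | nil => simp
  | cons a u ih =>
    simp only [List.dropWhile_cons]
    by_cases hav : (a == v) = true
    · rw [if_pos hav]
      exact ih (fun y hy => hvt y (List.mem_cons_of_mem _ hy)) (List.pairwise_cons.mp htp).2
    · rw [if_neg hav]
      intro hv
      rcases List.mem_cons.mp hv with h | h
      · exact hav (by rw [← h]; exact beq_self_eq_true v)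
      · have h1 : a ≤ v := (List.pairwise_cons.mp htp).1 v h
        have h2 : v ≤ a := hvt a List.mem_cons_self
        exact hav (by rw [le_antisymm h1 h2]; exact beq_self_eq_true v)

-- characterization of the scan of a sorted list: distinct = #toFinset, best = max count
theorem pv_scan_sorted (n : Nat) : ∀ (s : List Int), s.length ≤ n → s ≠ [] →
    s.Pairwise (· ≤ ·) →
    (s.foldl pvStep (none, 0, 0, 0)).2.2.2 = (s.toFinset.card : Int) ∧
    (∃ x ∈ s, (s.foldl pvStep (none, 0, 0, 0)).2.2.1 = (s.count x : Int)) ∧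
    (∀ x ∈ s, (s.count x : Int) ≤ (s.foldl pvStep (none, 0, 0, 0)).2.2.1) := by
  induction n with
  | zero =>
    intro s hlen hne _
    cases s with
    | nil => exact absurd rfl hne
    | cons v t => simp at hlen
  | succ n ih =>
    intro s hlen hne hsort
    obtain ⟨v, t, rfl⟩ : ∃ v t, s = v :: t := by
      cases s with
      | nil => exact absurd rfl hne
      | cons v t => exact ⟨v, t, rfl⟩
    have hvt : ∀ y ∈ t, v ≤ y := (List.pairwise_cons.mp hsort).1
    have htp : t.Pairwise (· ≤ ·) := (List.pairwise_cons.mp hsort).2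
    have htsplit : t.takeWhile (fun y => y == v) ++ t.dropWhile (fun y => y == v) = t :=
      List.takeWhile_append_dropWhile
    set tw := t.takeWhile (fun y => y == v) with htw
    set rest := t.dropWhile (fun y => y == v) with hrestdef
    have hrest_sorted : rest.Pairwise (· ≤ ·) := htp.sublist (List.dropWhile_sublist _)
    have hrest_sub : ∀ x ∈ rest, x ∈ t := fun x hx => (List.dropWhile_sublist _).subset hx
    have htw_rep : tw = List.replicate tw.length v := by
      apply List.eq_replicate_of_mem
      intro b hb
      have := List.mem_takeWhile_imp hb
      exact eq_of_beq this
    have hhead : ∀ (h : rest ≠ []), rest.head h ≠ v := by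
      intro h hv
      have := List.head_dropWhile_not (fun y => y == v) h
      rw [hv] at this
      simp at this
    have hvrest : v ∉ rest := pv_not_mem_dropWhile v t hvt htp
    -- counts
    have hcv : (v :: t).count v = tw.length + 1 := by
      rw [List.count_cons_self, ← htsplit, List.count_append]
      rw [List.count_eq_zero_of_not_mem hvrest]
      conv_lhs => rw [htw_rep]
      simp
    have hcx : ∀ x, x ≠ v → (v :: t).count x = rest.count x := by
      intro x hx
      rw [List.count_cons_of_ne (Ne.symm hx), ← htsplit, List.count_append]
      conv_lhs => rw [htw_rep]
      simp [List.count_replicate, Ne.symm hx]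
    -- the toFinset
    have hfin : (v :: t).toFinset = insert v rest.toFinset := by
      conv_lhs => rw [← htsplit]
      ext a
      simp only [List.toFinset_cons, List.toFinset_append, Finset.mem_insert, Finset.mem_union,
        List.mem_toFinset]
      constructor
      · rintro (h | h | h)
        · exact Or.inl h
        · have := List.mem_takeWhile_imp h
          exact Or.inl (eq_of_beq this)
        · exact Or.inr h
      · rintro (h | h)
        · exact Or.inl h
        · exact Or.inr (Or.inr h)
    have hvfin : v ∉ rest.toFinset := by simpa using hvrest
    -- the scan through the head and the leading run
    have hK1 : (1 : Int) ≤ 1 + (tw.length : Int) := by omega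
    have hscan : (v :: t).foldl pvStep (none, 0, 0, 0) =
        rest.foldl pvStep (some v, 1 + (tw.length : Int), 1 + (tw.length : Int), 1) := by
      rw [List.foldl_cons, pv_step_none]
      have h01 : (max 0 1 : Int) = 1 := by omega
      have h00 : (0 + 1 : Int) = 1 := by omega
      rw [h01, h00, ← htsplit, List.foldl_append]
      conv_lhs => rw [htw_rep]
      rw [pv_scan_replicate tw.length v 1 1 1 le_rfl]
      have : (max 1 (1 + (tw.length : Int))) = 1 + (tw.length : Int) := by omega
      rw [this]
    by_cases hrne : rest = []
    · -- the whole list is one run of v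
      have htv : t = tw := by rw [← htsplit, hrne, List.append_nil]
      rw [hscan, hrne, List.foldl_nil]
      have hallv : ∀ x ∈ v :: t, x = v := by
        intro x hx
        rcases List.mem_cons.mp hx with h | h
        · exact h
        · rw [htv, htw_rep] at h
          exact (List.mem_replicate.mp h).2
      refine ⟨?_, ⟨v, List.mem_cons_self, ?_⟩, ?_⟩
      · rw [hfin, hrne]
        simp
      · rw [hcv]; push_cast; ring
      · intro x hx
        rw [hallv x hx, hcv]
        push_cast; omega
    · -- a strictly larger remainder follows the first run
      have hrlen : rest.length ≤ n := by
        have h1 : rest.length ≤ t.length := (List.dropWhile_sublist _).length_le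
        have h2 : t.length ≤ n := by simpa using hlen
        omega
      obtain ⟨ihd, ⟨y, hy, hby⟩, ihub⟩ := ih rest hrlen hrne hrest_sorted
      set G := rest.foldl pvStep (none, 0, 0, 0) with hG
      have hrw : rest.foldl pvStep (some v, 1 + (tw.length : Int), 1 + (tw.length : Int), 1) =
          (G.1, G.2.1, max (1 + (tw.length : Int)) G.2.2.1, 1 + G.2.2.2) := by
        rw [pv_scan_offset rest (some v) (1 + (tw.length : Int)) (1 + (tw.length : Int)) 1
          (by omega) (by omega)]
        rw [pv_scan_restart rest v (1 + (tw.length : Int)) hrne (hhead hrne)]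
      rw [hscan, hrw]
      dsimp only
      have hyne : y ≠ v := fun h => hvrest (h ▸ hy)
      have hymem : y ∈ v :: t := List.mem_cons_of_mem v (hrest_sub y hy)
      refine ⟨?_, ?_, ?_⟩
      · -- distinct count
        rw [hfin, Finset.card_insert_of_notMem hvfin]
        push_cast
        omega
      · -- the maximum is attained
        rcases le_total G.2.2.1 (1 + (tw.length : Int)) with hle | hle
        · refine ⟨v, List.mem_cons_self, ?_⟩
          rw [hcv]
          push_cast
          omega
        · refine ⟨y, hymem, ?_⟩
          rw [hcx y hyne, ← hby]
          omega
      · -- the maximum bounds every count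
        intro x hx
        by_cases hxv : x = v
        · subst hxv
          rw [hcv]
          push_cast
          omega
        · rw [hcx x hxv]
          have hxrest : x ∈ rest := by
            rcases List.mem_cons.mp hx with h | h
            · exact absurd h hxv
            · rw [← htsplit] at h
              rcases List.mem_append.mp h with h | h
              · rw [htw_rep] at h
                exact absurd (List.mem_replicate.mp h).2 hxv
              · exact h
          have := ihub x hxrest
          omega

-- A-side characterization
theorem pv_A_char (a : List Int) (ha : a ≠ []) :
    ((PySem.Dict.counter a).size : Int) = (a.toFinset.card : Int) ∧
    (∃ x ∈ a, (PySem.List.max? (PySem.Dict.counter a).values (fun v => v)).getD 0 = (a.count x : Int)) ∧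
    (∀ x ∈ a, (a.count x : Int) ≤ (PySem.List.max? (PySem.Dict.counter a).values (fun v => v)).getD 0) := by
  have hvals : (PySem.Dict.counter a).values = (PySem.Set.ofList a).map (fun k => (a.count k : Int)) := by
    show ((PySem.Dict.counter a).items.map (·.2)) = _
    rw [PySem.Dict.items_counter, List.map_map]
    rfl
  have hsize : ((PySem.Dict.counter a).size : Int) = ((PySem.Set.ofList a).length : Int) := by
    show (((PySem.Dict.counter a).items.length : Nat) : Int) = _
    rw [PySem.Dict.items_counter, List.length_map]
  have hperm : (PySem.Set.ofList a).Perm a.dedup := by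
    rw [List.perm_ext_iff_of_nodup (PySem.Set.nodup_ofList a) a.nodup_dedup]
    intro x
    rw [PySem.Set.mem_ofList, List.mem_dedup]
  obtain ⟨x0, hx0⟩ := List.exists_mem_of_ne_nil a ha
  have hvne : (PySem.Dict.counter a).values ≠ [] := by
    rw [hvals]
    intro h
    have : x0 ∈ PySem.Set.ofList a := (PySem.Set.mem_ofList a x0).mpr hx0
    have := List.mem_map_of_mem (f := fun k => (a.count k : Int)) this
    rw [h] at this
    exact List.not_mem_nil this
  obtain ⟨m, hm⟩ : ∃ m, PySem.List.max? (PySem.Dict.counter a).values (fun v => v) = some m := by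
    cases h : PySem.List.max? (PySem.Dict.counter a).values (fun v => v) with
    | none => exact absurd ((PySem.List.max?_eq_none_iff _ _).mp h) hvne
    | some m => exact ⟨m, rfl⟩
  rw [hm]
  simp only [Option.getD_some]
  refine ⟨?_, ?_, ?_⟩
  · rw [hsize, List.card_toFinset, hperm.length_eq]
  · have hmem := PySem.List.max?_mem hm
    rw [hvals] at hmem
    obtain ⟨k, hk, hkm⟩ := List.mem_map.mp hmem
    exact ⟨k, (PySem.Set.mem_ofList a k).mp hk, hkm.symm⟩
  · intro x hx
    have hxv : (a.count x : Int) ∈ (PySem.Dict.counter a).values := by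
      rw [hvals]
      exact List.mem_map.mpr ⟨x, (PySem.Set.mem_ofList a x).mpr hx, rfl⟩
    exact PySem.List.max?_isMax hm _ hxv

theorem pv_case_eq (a : List Int) (ha : a ≠ []) : pvCaseA a = pvCaseB a := by
  obtain ⟨hAd, ⟨xa, hxa, hAm⟩, hAub⟩ := pv_A_char a ha
  have hs_perm : (PySem.List.sorted a (fun x => x) false).Perm a := PySem.List.sorted_perm a _ false
  have hs_ne : PySem.List.sorted a (fun x => x) false ≠ [] := by
    intro h
    exact ha ((PySem.List.sorted_eq_nil_iff a _ false).mp h)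
  have hs_sorted : (PySem.List.sorted a (fun x => x) false).Pairwise (· ≤ ·) :=
    PySem.List.sorted_pairwise a (fun x => x)
  obtain ⟨hBd, ⟨xb, hxb, hBm⟩, hBub⟩ :=
    pv_scan_sorted (PySem.List.sorted a (fun x => x) false).length _ le_rfl hs_ne hs_sorted
  have hfin : (PySem.List.sorted a (fun x => x) false).toFinset = a.toFinset :=
    List.toFinset_eq_of_perm _ _ hs_perm
  have hcnt : ∀ x, (PySem.List.sorted a (fun x => x) false).count x = a.count x :=
    fun x => hs_perm.count_eq x
  have hd : ((PySem.Dict.counter a).size : Int) =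
      ((PySem.List.sorted a (fun x => x) false).foldl pvStep (none, 0, 0, 0)).2.2.2 := by
    rw [hAd, hBd, hfin]
  have hmx : (PySem.List.max? (PySem.Dict.counter a).values (fun v => v)).getD 0 =
      ((PySem.List.sorted a (fun x => x) false).foldl pvStep (none, 0, 0, 0)).2.2.1 := by
    apply le_antisymm
    · rw [hAm, ← hcnt xa]
      exact hBub xa (hs_perm.mem_iff.mpr hxa)
    · rw [hBm, hcnt xb]
      exact hAub xb (hs_perm.mem_iff.mp hxb)
  simp only [pvCaseA, pvCaseB]
  rw [hd, hmx]

-- ===== VERDICT (by name: the statement is the Claim_ definition above) =====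
theorem pv_foldl_eq (tcs : List (Int × List Int)) (hpre : ∀ c ∈ tcs, c.2 ≠ []) :
    ∀ (acc : List Int), tcs.foldl (fun results case => results ++ [pvCaseA case.2]) acc = tcs.foldl (fun results case => results ++ [pvCaseB case.2]) acc := by
  induction tcs with
  | nil => intro acc; rfl
  | cons c rest ih =>
    intro acc
    simp only [List.foldl_cons]
    rw [pv_case_eq c.2 (hpre c (List.mem_cons_self))]
    exact ih (fun d hd => hpre d (List.mem_cons_of_mem _ hd)) _

theorem max_team_size_spec : Claim_equal_max_team_size := by
  intro t tcs _ hpre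
  exact pv_foldl_eq tcs hpre []
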